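-- pv_equiv track=rewrite | github.com/DTaa2105ta/CMU-15-112 | week 5/hw5.py | fillLetters
-- ===== SOURCE A (Python) =====
-- def fillLetters(board):
--     dirs = [ (-1, -1), (-1, 0), (-1, +1),
--              ( 0, -1),          ( 0, +1),
--              (+1, -1), (+1, 0), (+1, +1) ]
--
--     (rows, cols) = (len(board), len(board[0]))
--
--     for row in range(rows):
--         for col in range(cols):
--             if board[row][col] == '-':
--                 checkNeighbor = list()
--                 for (x,y) in dirs:
--                     rowD = row + x
--                     colD = col + y
--                     if ((rowD < 0) or (rowD >= rows) or
--                         (colD < 0) or (colD >= cols) or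
--                         (board[rowD][colD] == '-')):
--                         continue
--
--                     neighborOrd = ord(board[rowD][colD])
--                     checkNeighbor.append(neighborOrd)
--                     minOrd = min(checkNeighbor)
--                     maxOrd = max(checkNeighbor)
--                     if minOrd > ord('a'):
--                         board[row][col] = 'a'
--                     else:
--                         nextMinOrd = minOrd + 1
--                         while nextMinOrd != maxOrd:
--                             if (nextMinOrd) not in checkNeighbor:
--                                 board[row][col] = chr(nextMinOrd)
--                                 break
--                             else:
--                                 nextMinOrd += 1
--                         else:
--                             board[row][col] = chr(maxOrd+1)
--     return board
-- ===== SOURCE B (Python) =====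
-- # B: per '-' cell, build the sorted distinct neighbor ords from the clamped
-- # 3x3 index window (the center is '-' so no self-exclusion is needed), then
-- # read the answer off the sorted list: 'a' if its minimum is above ord('a'),
-- # otherwise one past the end of the initial consecutive run.  Replaces A's
-- # per-appended-neighbor min/max recomputation and bounded membership while
-- # loop.  Like A, mutates `board` in place and returns it.
-- def fillLetters(board):
--     rows, cols = len(board), len(board[0])
--     for row in range(rows):
--         for col in range(cols):
--             if board[row][col] != '-':
--                 continue
--             vals = sorted({ord(board[r][c])
--                            for r in range(max(0, row - 1), min(rows, row + 2))
--                            for c in range(max(0, col - 1), min(cols, col + 2))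
--                            if board[r][c] != '-'})
--             if not vals:
--                 continue
--             if vals[0] > ord('a'):
--                 board[row][col] = 'a'
--             else:
--                 run = vals[0]
--                 for v in vals[1:]:
--                     if v == run + 1:
--                         run = v
--                     else:
--                         break
--                 board[row][col] = chr(run + 1)
--     return board
-- ===== Notes on version B (the rewrite author's own statement) =====
-- stated objective: alternative
-- what changed: B gathers each '-' cell's neighbor ords over a clamped 3x3 index window (no direction list, no self-exclusion since the center is '-'), sorts the distinct ords, and reads the answer off the sorted list as one past the end of the initial consecutive run, replacing A's per-appended-neighbor min/max recomputation and bounded membership while loop with a sort-then-run-scan.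
import Mathlib
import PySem

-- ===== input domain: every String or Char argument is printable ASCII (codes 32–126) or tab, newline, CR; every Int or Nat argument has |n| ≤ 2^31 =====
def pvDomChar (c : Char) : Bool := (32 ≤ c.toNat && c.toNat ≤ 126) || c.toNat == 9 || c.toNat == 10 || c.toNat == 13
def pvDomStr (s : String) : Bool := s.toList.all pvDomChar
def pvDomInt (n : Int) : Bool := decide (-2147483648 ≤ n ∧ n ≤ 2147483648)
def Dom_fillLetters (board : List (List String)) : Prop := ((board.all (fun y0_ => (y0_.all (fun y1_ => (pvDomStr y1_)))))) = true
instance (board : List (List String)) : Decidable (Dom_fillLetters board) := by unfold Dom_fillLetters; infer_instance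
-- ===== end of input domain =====

-- B gathers each '-' cell's neighbor ords over a clamped 3x3 index window, sorts the
-- distinct ords once, and reads the answer off the sorted list (one past the end of the
-- initial consecutive run), instead of A's per-appended-neighbor min/max recomputation
-- and bounded membership while loop over a direction list; same objective behaviour
-- (both Pythons mutate `board` in place identically and return it).

-- ===== PORT A =====
-- shared cell primitives: board[i][j] read / board[i][j] = v write (exact inside Pre_,
-- where every index used is in range)
def pvGetCell (b : List (List String)) (i j : Nat) : String := (b.getD i []).getD j ""
def pvSetCell (b : List (List String)) (i j : Nat) (v : String) : List (List String) :=
  b.set i ((b.getD i []).set j v)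
-- ord(s): exact for the single-character strings Pre_ admits at ord sites
def pvOrd (s : String) : Int := ((s.toList.headD 'a').toNat : Int)
def pvDirs : List (Int × Int) :=
  [(-1, -1), (-1, 0), (-1, 1), (0, -1), (0, 1), (1, -1), (1, 0), (1, 1)]

-- termination helper for A's while-loop (cited by its decreasing_by)
theorem pv_filter_succ_lt (L : List Int) (c : Int) (h : c ∈ L) :
    (L.filter (fun x => decide (c < x))).length <
      (L.filter (fun x => decide (c ≤ x))).length := by
  induction L with
  | nil => cases h
  | cons a t ih =>
    have hmono : (t.filter (fun x => decide (c < x))).length ≤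
        (t.filter (fun x => decide (c ≤ x))).length := by
      have himp : ∀ x : Int, (decide (c < x)) = true → (decide (c ≤ x)) = true := by
        intro x hx; simp at hx ⊢; omega
      exact List.Sublist.length_le (List.monotone_filter_right t himp)
    simp only [List.filter_cons]
    rcases List.mem_cons.1 h with rfl | h'
    · simp; omega
    · have IH := ih h'
      by_cases h1 : c < a
      · have h2 : c ≤ a := by omega
        simp [h1, h2]; omega
      · by_cases h2 : c ≤ a
        · simp [h1, h2]; omega
        · simp [h1, h2]; omega

-- A's inner while loop: from nextMinOrd = c, 'while c != M: if c not in L: write chr(c); break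
-- else c += 1; else: write chr(M+1)' — returns the ord that gets written
def awLoop (L : List Int) (M : Int) (c : Int) : Int :=
  if c = M then M + 1
  else if c ∈ L then awLoop L M (c + 1)
  else c
termination_by (L.filter (fun x => decide (c ≤ x))).length
decreasing_by simpa using pv_filter_succ_lt L c (by assumption)

-- one step of A's 'for (x,y) in dirs' loop; state = (checkNeighbor, board)
def pvAStep (rows cols row col : Nat) (st : List Int × List (List String)) (d : Int × Int) :
    List Int × List (List String) :=
  let rowD : Int := (row : Int) + d.1
  let colD : Int := (col : Int) + d.2
  if rowD < 0 ∨ (rows : Int) ≤ rowD ∨ colD < 0 ∨ (cols : Int) ≤ colD ∨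
      pvGetCell st.2 rowD.toNat colD.toNat = "-" then st
  else
    let o := pvOrd (pvGetCell st.2 rowD.toNat colD.toNat)
    let check := st.1 ++ [o]
    let m := (PySem.List.min? check (fun x => x)).getD 0
    let M := (PySem.List.max? check (fun x => x)).getD 0
    let b' := if 97 < m then pvSetCell st.2 row col "a"
              else pvSetCell st.2 row col (String.ofList [Char.ofNat (awLoop check M (m + 1)).toNat])
    (check, b')

def fillLetters (board : List (List String)) : List (List String) :=
  let rows := board.length
  let cols := (board.headD []).length
  (List.range rows).foldl (fun b row =>
    (List.range cols).foldl (fun b col =>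
      if pvGetCell b row col = "-" then
        (pvDirs.foldl (pvAStep rows cols row col) ([], b)).2
      else b) b) board

-- ===== PORT B =====
-- B's set comprehension: distinct neighbor ords from the clamped 3x3 window
def pvGatherB (rows cols row col : Nat) (b : List (List String)) : PySem.Set Int :=
  (PySem.List.pyRange (max 0 ((row : Int) - 1)) (min (rows : Int) ((row : Int) + 2)) 1).foldl
    (fun s r =>
      (PySem.List.pyRange (max 0 ((col : Int) - 1)) (min (cols : Int) ((col : Int) + 2)) 1).foldl
        (fun s c =>
          if pvGetCell b r.toNat c.toNat ≠ "-" then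
            PySem.Set.add s (pvOrd (pvGetCell b r.toNat c.toNat))
          else s) s) PySem.Set.empty

-- B's 'run = vals[0]; for v in vals[1:]: if v == run + 1: run = v else break'
def runScan (c : Int) (vs : List Int) : Int :=
  match vs with
  | [] => c
  | v :: t => if v = c + 1 then runScan v t else c

def fillLetters_alt (board : List (List String)) : List (List String) :=
  let rows := board.length
  let cols := (board.headD []).length
  (List.range rows).foldl (fun b row =>
    (List.range cols).foldl (fun b col =>
      if pvGetCell b row col ≠ "-" then b
      else
        match PySem.List.sorted (pvGatherB rows cols row col b) (fun x => x) false with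
        | [] => b
        | m :: rest =>
          if 97 < m then pvSetCell b row col "a"
          else pvSetCell b row col
            (String.ofList [Char.ofNat (runScan m rest + 1).toNat])) b) board

-- ===== PRECONDITION & SPEC =====
-- Pre_ is exactly where the Python A returns normally: a nonempty board (else len(board[0])
-- raises IndexError), every row at least len(board[0]) long (else board[row][col] raises
-- IndexError in the main loop), and every in-bounds non-'-' cell adjacent to an in-bounds
-- '-' cell a single character (else ord(...) raises TypeError).
def Pre_fillLetters (board : List (List String)) : Prop :=
  board ≠ [] ∧
  (∀ r ∈ board, (board.headD []).length ≤ r.length) ∧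
  (∀ i ∈ List.range board.length, ∀ j ∈ List.range (board.headD []).length,
    pvGetCell board i j = "-" →
      ∀ i' ∈ List.range board.length, ∀ j' ∈ List.range (board.headD []).length,
        (i' ≤ i + 1 ∧ i ≤ i' + 1 ∧ j' ≤ j + 1 ∧ j ≤ j' + 1 ∧ ¬(i' = i ∧ j' = j)) →
        pvGetCell board i' j' ≠ "-" →
        (pvGetCell board i' j').toList.length = 1)
instance (board : List (List String)) : Decidable (Pre_fillLetters board) := by
  unfold Pre_fillLetters; infer_instance

def pvWitness_fillLetters : List (List String) := [["-", "b"], ["c", "-"]]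

def Spec_fillLetters (board : List (List String)) (out : List (List String)) : Prop := out = fillLetters_alt board
instance (board : List (List String)) (out : List (List String)) : Decidable (Spec_fillLetters board out) := by unfold Spec_fillLetters; infer_instance

-- ===== CLAIM (what is proved, stated in full; the proofs are below) =====
def Claim_equal_fillLetters : Prop := ∀ (board : List (List String)), Dom_fillLetters board → Pre_fillLetters board → Spec_fillLetters board (fillLetters board)

-- ===== LEMMAS AND PROOFS =====

-- pure version of A's neighbor step: reads from the fixed board b0
def gStep (b0 : List (List String)) (rows cols row col : Nat) (check : List Int) (d : Int × Int) : List Int :=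
  let rowD : Int := (row : Int) + d.1
  let colD : Int := (col : Int) + d.2
  if rowD < 0 ∨ (rows : Int) ≤ rowD ∨ colD < 0 ∨ (cols : Int) ≤ colD ∨
      pvGetCell b0 rowD.toNat colD.toNat = "-" then check
  else check ++ [pvOrd (pvGetCell b0 rowD.toNat colD.toNat)]

-- the string A's last write stores, as a function of the final gathered list
def ansStr (L : List Int) : String :=
  let m := (PySem.List.min? L (fun x => x)).getD 0
  let M := (PySem.List.max? L (fun x => x)).getD 0
  if 97 < m then "a" else String.ofList [Char.ofNat (awLoop L M (m + 1)).toNat]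

-- proof-side loop: 'while c in S: c += 1' (smallest value ≥ c not in S)
def bwLoop (S : List Int) (c : Int) : Int :=
  if c ∈ S then bwLoop S (c + 1) else c
termination_by (S.filter (fun x => decide (c ≤ x))).length
decreasing_by simpa using pv_filter_succ_lt S c (by assumption)

theorem getCell_setCell_ne (b : List (List String)) (row col i j : Nat) (v : String)
    (h : ¬(i = row ∧ j = col)) : pvGetCell (pvSetCell b row col v) i j = pvGetCell b i j := by
  unfold pvGetCell pvSetCell
  by_cases hi : i = row
  · subst hi
    have hj : j ≠ col := fun hj => h ⟨rfl, hj⟩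
    by_cases hlen : i < b.length
    · rw [List.getD_eq_getElem?_getD (l := b.set i ((b.getD i []).set col v)),
        List.getElem?_set, if_pos rfl, if_pos hlen]
      simp only [Option.getD_some]
      rw [List.getD_eq_getElem?_getD (l := (b.getD i []).set col v),
        List.getElem?_set, if_neg (fun hc => hj hc.symm), ← List.getD_eq_getElem?_getD]
    · rw [List.set_eq_of_length_le (by omega)]
  · rw [List.getD_eq_getElem?_getD (l := b.set row ((b.getD row []).set col v)),
      List.getElem?_set, if_neg (fun hc => hi hc.symm), ← List.getD_eq_getElem?_getD]

theorem setCell_setCell (b : List (List String)) (row col : Nat) (w v : String) :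
    pvSetCell (pvSetCell b row col w) row col v = pvSetCell b row col v := by
  unfold pvSetCell
  by_cases hlen : row < b.length
  · have h1 : ((b.set row ((b.getD row []).set col w)).getD row []) = (b.getD row []).set col w := by
      rw [List.getD_eq_getElem?_getD (l := b.set row ((b.getD row []).set col w)),
        List.getElem?_set, if_pos rfl, if_pos hlen]
      rfl
    rw [h1, List.set_set, List.set_set]
  · have hb1 : ∀ X : List String, b.set row X = b :=
      fun X => List.set_eq_of_length_le (by omega)
    simp only [hb1]

theorem gFold_len (b0 : List (List String)) (rows cols row col : Nat) :
    ∀ (ds : List (Int × Int)) (check : List Int),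
      check.length ≤ (ds.foldl (gStep b0 rows cols row col) check).length := by
  intro ds
  induction ds with
  | nil => intro check; simp
  | cons d t ih =>
    intro check
    simp only [List.foldl_cons]
    refine le_trans ?_ (ih (gStep b0 rows cols row col check d))
    simp only [gStep]
    split
    · rfl
    · simp

theorem aFold_inv (rows cols row col : Nat) (b0 : List (List String)) :
    ∀ (ds : List (Int × Int)), (∀ d ∈ ds, ¬(d.1 = 0 ∧ d.2 = 0)) →
    ∀ (check : List Int) (b : List (List String)),
      (b = b0 ∨ ∃ w, b = pvSetCell b0 row col w) →
      ds.foldl (pvAStep rows cols row col) (check, b) =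
        (ds.foldl (gStep b0 rows cols row col) check,
         if ds.foldl (gStep b0 rows cols row col) check = check then b
         else pvSetCell b0 row col (ansStr (ds.foldl (gStep b0 rows cols row col) check))) := by
  intro ds
  induction ds with
  | nil => intro _ check b hb; simp
  | cons d t ih =>
    intro hds check b hb
    have hd : ¬(d.1 = 0 ∧ d.2 = 0) := hds d (List.mem_cons_self ..)
    have hds' : ∀ d' ∈ t, ¬(d'.1 = 0 ∧ d'.2 = 0) := fun d' hd' => hds d' (List.mem_cons_of_mem _ hd')
    by_cases hbounds : (row : Int) + d.1 < 0 ∨ (rows : Int) ≤ (row : Int) + d.1 ∨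
        (col : Int) + d.2 < 0 ∨ (cols : Int) ≤ (col : Int) + d.2
    · -- out of bounds: both guards hold, step is skipped
      have hstep : pvAStep rows cols row col (check, b) d = (check, b) := by
        simp only [pvAStep]
        rw [if_pos (by tauto)]
      have hgstep : gStep b0 rows cols row col check d = check := by
        simp only [gStep]
        rw [if_pos (by tauto)]
      simp only [List.foldl_cons, hstep, hgstep]
      exact ih hds' check b hb
    · push Not at hbounds
      obtain ⟨hb1, hb2, hb3, hb4⟩ := hbounds
      have hne : ¬(((row : Int) + d.1).toNat = row ∧ ((col : Int) + d.2).toNat = col) := by omega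
      have hread : pvGetCell b ((row : Int) + d.1).toNat ((col : Int) + d.2).toNat =
          pvGetCell b0 ((row : Int) + d.1).toNat ((col : Int) + d.2).toNat := by
        rcases hb with rfl | ⟨w, rfl⟩
        · rfl
        · exact getCell_setCell_ne b0 row col _ _ w hne
      by_cases hdash : pvGetCell b0 ((row : Int) + d.1).toNat ((col : Int) + d.2).toNat = "-"
      · -- neighbor is '-': skipped
        have hstep : pvAStep rows cols row col (check, b) d = (check, b) := by
          simp only [pvAStep]
          rw [if_pos (by rw [hread]; tauto)]
        have hgstep : gStep b0 rows cols row col check d = check := by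
          simp only [gStep]
          rw [if_pos (by tauto)]
        simp only [List.foldl_cons, hstep, hgstep]
        exact ih hds' check b hb
      · -- appended: the cell gets (re)written
        have hguard : ¬((row : Int) + d.1 < 0 ∨ (rows : Int) ≤ (row : Int) + d.1 ∨
            (col : Int) + d.2 < 0 ∨ (cols : Int) ≤ (col : Int) + d.2 ∨
            pvGetCell b ((row : Int) + d.1).toNat ((col : Int) + d.2).toNat = "-") := by
          rw [hread]; push Not; exact ⟨by omega, by omega, by omega, by omega, hdash⟩
        have hguard0 : ¬((row : Int) + d.1 < 0 ∨ (rows : Int) ≤ (row : Int) + d.1 ∨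
            (col : Int) + d.2 < 0 ∨ (cols : Int) ≤ (col : Int) + d.2 ∨
            pvGetCell b0 ((row : Int) + d.1).toNat ((col : Int) + d.2).toNat = "-") := by
          push Not; exact ⟨by omega, by omega, by omega, by omega, hdash⟩
        have hsetb : ∀ v : String, pvSetCell b row col v = pvSetCell b0 row col v := by
          intro v
          rcases hb with rfl | ⟨w, rfl⟩
          · rfl
          · exact setCell_setCell b0 row col w v
        have hstep : pvAStep rows cols row col (check, b) d =
            (check ++ [pvOrd (pvGetCell b0 ((row : Int) + d.1).toNat ((col : Int) + d.2).toNat)],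
             pvSetCell b0 row col (ansStr (check ++
               [pvOrd (pvGetCell b0 ((row : Int) + d.1).toNat ((col : Int) + d.2).toNat)]))) := by
          simp only [pvAStep]
          rw [if_neg hguard]
          simp only [hread, ansStr, hsetb]
          split <;> rfl
        have hgstep : gStep b0 rows cols row col check d = check ++
            [pvOrd (pvGetCell b0 ((row : Int) + d.1).toNat ((col : Int) + d.2).toNat)] := by
          simp only [gStep]
          rw [if_neg hguard0]
        set check' := check ++
          [pvOrd (pvGetCell b0 ((row : Int) + d.1).toNat ((col : Int) + d.2).toNat)] with hcheck'
        have hlen : check'.length = check.length + 1 := by simp [hcheck']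
        have hlen2 : check.length + 1 ≤ (t.foldl (gStep b0 rows cols row col) check').length := by
          rw [← hlen]; exact gFold_len b0 rows cols row col t check'
        have hne2 : t.foldl (gStep b0 rows cols row col) check' ≠ check := by
          intro hcontra
          have := congrArg List.length hcontra
          omega
        simp only [List.foldl_cons, hstep, hgstep, if_neg hne2]
        have := ih hds' check' (pvSetCell b0 row col (ansStr check')) (Or.inr ⟨_, rfl⟩)
        rw [this]
        by_cases hEq : t.foldl (gStep b0 rows cols row col) check' = check'
        · rw [if_pos hEq, hEq]
        · rw [if_neg hEq]

-- items abstraction: a Bool-guarded append / set-add fold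
def stepS (s : List Int) (it : Bool × Int) : List Int := if it.1 then PySem.Set.add s it.2 else s
def stepL (l : List Int) (it : Bool × Int) : List Int := if it.1 then l ++ [it.2] else l

def itemOf (b0 : List (List String)) (rows cols row col : Nat) (p : Int × Int) : Bool × Int :=
  (decide ((p ≠ ((row : Int), (col : Int))) ∧ 0 ≤ p.1 ∧ p.1 < (rows : Int) ∧ 0 ≤ p.2 ∧
      p.2 < (cols : Int) ∧ pvGetCell b0 p.1.toNat p.2.toNat ≠ "-"),
   pvOrd (pvGetCell b0 p.1.toNat p.2.toNat))

-- item view for B's gather: the range bounds already enforce the window, only non-dash guards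
def itemB (b0 : List (List String)) (p : Int × Int) : Bool × Int :=
  (decide (pvGetCell b0 p.1.toNat p.2.toNat ≠ "-"), pvOrd (pvGetCell b0 p.1.toNat p.2.toNat))

theorem mem_foldl_stepS (items : List (Bool × Int)) (s : List Int) (x : Int) :
    x ∈ items.foldl stepS s ↔ x ∈ s ∨ (true, x) ∈ items := by
  induction items generalizing s with
  | nil => simp
  | cons it t ih =>
    obtain ⟨bo, v⟩ := it
    simp only [List.foldl_cons, ih, stepS]
    cases bo
    · simp
    · simp [PySem.Set.mem_add]
      tauto

theorem nodup_foldl_stepS (items : List (Bool × Int)) (s : List Int) (hs : s.Nodup) :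
    (items.foldl stepS s).Nodup := by
  induction items generalizing s with
  | nil => exact hs
  | cons it t ih =>
    simp only [List.foldl_cons, stepS]
    split
    · exact ih _ (PySem.Set.nodup_add _ _ hs)
    · exact ih _ hs

theorem mem_foldl_stepL (items : List (Bool × Int)) (l : List Int) (x : Int) :
    x ∈ items.foldl stepL l ↔ x ∈ l ∨ (true, x) ∈ items := by
  induction items generalizing l with
  | nil => simp
  | cons it t ih =>
    obtain ⟨bo, v⟩ := it
    simp only [List.foldl_cons, ih, stepL]
    cases bo
    · simp
    · simp
      tauto

def pvPairsB (rows cols row col : Nat) : List (Int × Int) :=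
  (PySem.List.pyRange (max 0 ((row : Int) - 1)) (min (rows : Int) ((row : Int) + 2)) 1).flatMap
    (fun r => (PySem.List.pyRange (max 0 ((col : Int) - 1)) (min (cols : Int) ((col : Int) + 2)) 1).map
      (fun c => (r, c)))

theorem gatherB_eq (rows cols row col : Nat) (b0 : List (List String)) :
    pvGatherB rows cols row col b0 =
      ((pvPairsB rows cols row col).map (itemB b0)).foldl stepS [] := by
  unfold pvGatherB pvPairsB
  conv_rhs => rw [List.foldl_map, List.foldl_flatMap]
  simp only [List.foldl_map]
  congr 1
  funext s r
  congr 1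
  funext s c
  simp only [stepS, itemB]
  by_cases h2 : pvGetCell b0 r.toNat c.toNat ≠ "-"
  · rw [if_pos h2, if_pos (by simpa using h2)]
  · rw [if_neg h2, if_neg (by simpa using h2)]

theorem mem_pairsB (rows cols row col : Nat) (p : Int × Int) :
    p ∈ pvPairsB rows cols row col ↔
      (max 0 ((row : Int) - 1) ≤ p.1 ∧ p.1 < min (rows : Int) ((row : Int) + 2) ∧
       max 0 ((col : Int) - 1) ≤ p.2 ∧ p.2 < min (cols : Int) ((col : Int) + 2)) := by
  obtain ⟨r, c⟩ := p
  unfold pvPairsB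
  simp only [List.mem_flatMap, List.mem_map, Prod.mk.injEq]
  constructor
  · rintro ⟨r', hr', c', hc', rfl, rfl⟩
    rw [PySem.List.mem_pyRange_one] at hr' hc'
    exact ⟨hr'.1, hr'.2, hc'.1, hc'.2⟩
  · rintro ⟨h1, h2, h3, h4⟩
    exact ⟨r, (PySem.List.mem_pyRange_one).2 ⟨h1, h2⟩,
      c, (PySem.List.mem_pyRange_one).2 ⟨h3, h4⟩, rfl, rfl⟩

theorem gStep_eq_stepL (rows cols row col : Nat) (b0 : List (List String)) (d : Int × Int)
    (hd : ¬(d.1 = 0 ∧ d.2 = 0)) (acc : List Int) :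
    gStep b0 rows cols row col acc d =
      stepL acc (itemOf b0 rows cols row col ((row : Int) + d.1, (col : Int) + d.2)) := by
  simp only [gStep, stepL, itemOf]
  by_cases hv : pvGetCell b0 ((row : Int) + d.1).toNat ((col : Int) + d.2).toNat = "-"
  · rw [if_pos (by tauto), if_neg (by simp only [decide_eq_true_eq]; tauto)]
  · by_cases hbound : (row : Int) + d.1 < 0 ∨ (rows : Int) ≤ (row : Int) + d.1 ∨
        (col : Int) + d.2 < 0 ∨ (cols : Int) ≤ (col : Int) + d.2
    · rw [if_pos (by tauto), if_neg ?_]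
      simp only [decide_eq_true_eq, not_and]
      intro _ h1 h2 h3 h4
      exfalso
      rcases hbound with h | h | h | h <;> omega
    · rw [if_neg (by tauto), if_pos ?_]
      simp only [decide_eq_true_eq]
      refine ⟨?_, by omega, by omega, by omega, by omega, hv⟩
      intro heq
      rw [Prod.mk.injEq] at heq
      exact hd ⟨by omega, by omega⟩

theorem gList_eq (rows cols row col : Nat) (b0 : List (List String)) :
    pvDirs.foldl (gStep b0 rows cols row col) [] =
      ((pvDirs.map (fun d => ((row : Int) + d.1, (col : Int) + d.2))).map
        (itemOf b0 rows cols row col)).foldl stepL [] := by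
  rw [List.foldl_map, List.foldl_map]
  apply PySem.List.foldl_congr_mem
  intro acc d hdmem
  have hd : ¬(d.1 = 0 ∧ d.2 = 0) := by
    have hall : ∀ d ∈ pvDirs, ¬(d.1 = 0 ∧ d.2 = 0) := by decide
    exact hall d hdmem
  exact gStep_eq_stepL rows cols row col b0 d hd acc

-- the two gathers have the same members (given that the center cell is '-')
theorem mem_pvDirs_of (d1 d2 : Int) (h1 : -1 ≤ d1) (h2 : d1 ≤ 1) (h3 : -1 ≤ d2) (h4 : d2 ≤ 1)
    (h5 : ¬(d1 = 0 ∧ d2 = 0)) : (d1, d2) ∈ pvDirs := by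
  have e1 : d1 = -1 ∨ d1 = 0 ∨ d1 = 1 := by omega
  have e2 : d2 = -1 ∨ d2 = 0 ∨ d2 = 1 := by omega
  rcases e1 with rfl | rfl | rfl <;> rcases e2 with rfl | rfl | rfl <;> simp_all [pvDirs]

theorem mem_gatherB_iff (rows cols row col : Nat) (b0 : List (List String))
    (hdash : pvGetCell b0 row col = "-") (x : Int) :
    x ∈ pvGatherB rows cols row col b0 ↔ x ∈ pvDirs.foldl (gStep b0 rows cols row col) [] := by
  rw [gatherB_eq, gList_eq, mem_foldl_stepS, mem_foldl_stepL, List.map_map]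
  simp only [List.not_mem_nil, false_or, List.mem_map, Function.comp_apply]
  constructor
  · rintro ⟨⟨pr, pc⟩, hp, hitem⟩
    rw [mem_pairsB] at hp
    dsimp only at hp hitem
    obtain ⟨h1, h2, h3, h4⟩ := hp
    rw [itemB, Prod.mk.injEq] at hitem
    dsimp only at hitem
    obtain ⟨hguard, hval⟩ := hitem
    rw [decide_eq_true_eq] at hguard
    have hpne : ¬(pr = (row : Int) ∧ pc = (col : Int)) := by
      rintro ⟨rfl, rfl⟩
      apply hguard
      simpa using hdash
    refine ⟨(pr - (row : Int), pc - (col : Int)), ?_, ?_⟩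
    · exact mem_pvDirs_of _ _ (by omega) (by omega) (by omega) (by omega) (by omega)
    · have e1 : (row : Int) + (pr - (row : Int)) = pr := by omega
      have e2 : (col : Int) + (pc - (col : Int)) = pc := by omega
      dsimp only
      simp only [e1, e2, itemOf, Prod.mk.injEq, decide_eq_true_eq]
      refine ⟨⟨?_, by omega, by omega, by omega, by omega, hguard⟩, hval⟩
      intro hc
      rw [Prod.mk.injEq] at hc
      exact hpne ⟨hc.1, hc.2⟩
  · rintro ⟨d, hd, hitem⟩
    rw [itemOf, Prod.mk.injEq] at hitem
    dsimp only at hitem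
    obtain ⟨hguard, hval⟩ := hitem
    rw [decide_eq_true_eq] at hguard
    obtain ⟨hpne, hr0, hr1, hc0, hc1, hnd⟩ := hguard
    have hdrange : (-1 ≤ d.1 ∧ d.1 ≤ 1 ∧ -1 ≤ d.2 ∧ d.2 ≤ 1) := by
      have hall : ∀ e ∈ pvDirs, -1 ≤ e.1 ∧ e.1 ≤ 1 ∧ -1 ≤ e.2 ∧ e.2 ≤ 1 := by decide
      exact hall d hd
    refine ⟨((row : Int) + d.1, (col : Int) + d.2), ?_, ?_⟩
    · rw [mem_pairsB]
      exact ⟨by omega, by omega, by omega, by omega⟩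
    · rw [itemB, Prod.mk.injEq]
      dsimp only
      exact ⟨by rw [decide_eq_true_eq]; exact hnd, hval⟩

theorem min_eq (L S : List Int) (hmem : ∀ x, x ∈ S ↔ x ∈ L) :
    PySem.List.min? S (fun x => x) = PySem.List.min? L (fun x => x) := by
  by_cases hL : L = []
  · subst hL
    have hS : S = [] := by
      rw [List.eq_nil_iff_forall_not_mem]
      intro x hx
      simpa using (hmem x).1 hx
    rw [hS]
  · have hS : S ≠ [] := by
      intro h
      rcases List.exists_mem_of_ne_nil L hL with ⟨a, ha⟩
      have : a ∈ S := (hmem a).2 ha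
      simp [h] at this
    obtain ⟨m, hm⟩ := Option.ne_none_iff_exists'.1
      (fun h => hS ((PySem.List.min?_eq_none_iff S (fun x : Int => x)).1 h))
    obtain ⟨m', hm'⟩ := Option.ne_none_iff_exists'.1
      (fun h => hL ((PySem.List.min?_eq_none_iff L (fun x : Int => x)).1 h))
    have h1 : m ∈ S := PySem.List.min?_mem hm
    have h2 : m' ∈ L := PySem.List.min?_mem hm'
    have h3 : ∀ y ∈ S, m ≤ y := by have := PySem.List.min?_isMin hm; simpa using this
    have h4 : ∀ y ∈ L, m' ≤ y := by have := PySem.List.min?_isMin hm'; simpa using this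
    have hmm : m = m' := le_antisymm (h3 _ ((hmem m').2 h2)) (h4 _ ((hmem m).1 h1))
    rw [hm, hm', hmm]

theorem loops_eq (L S : List Int) (hmem : ∀ x, x ∈ S ↔ x ∈ L) (M : Int)
    (hM : PySem.List.max? L (fun x => x) = some M) : ∀ c, awLoop L M c = bwLoop S c := by
  have hMmem : M ∈ L := PySem.List.max?_mem hM
  have hMmax : ∀ y ∈ L, y ≤ M := by
    have := PySem.List.max?_isMax hM
    simpa using this
  have key : ∀ n c, (M + 1 - c).toNat = n → awLoop L M c = bwLoop S c := by
    intro n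
    induction n using Nat.strong_induction_on with
    | _ n IH =>
      intro c hc
      by_cases hcM : c = M
      · subst hcM
        rw [awLoop, if_pos rfl, bwLoop, if_pos ((hmem _).2 hMmem), bwLoop,
          if_neg (fun h => by have := hMmax _ ((hmem _).1 h); omega)]
      · by_cases hcL : c ∈ L
        · have hle : c ≤ M := hMmax c hcL
          rw [awLoop, if_neg hcM, if_pos hcL, bwLoop, if_pos ((hmem c).2 hcL)]
          exact IH (M + 1 - (c + 1)).toNat (by omega) (c + 1) rfl
        · rw [awLoop, if_neg hcM, if_neg hcL, bwLoop, if_neg (fun h => hcL ((hmem c).1 h))]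
  intro c
  exact key _ c rfl

-- bwLoop computes the first value ≥ c outside S
theorem bwLoop_eq_of (S : List Int) : ∀ (n : Nat) (c r : Int), (r - c).toNat = n → c ≤ r →
    r ∉ S → (∀ x, c ≤ x → x < r → x ∈ S) → bwLoop S c = r := by
  intro n
  induction n using Nat.strong_induction_on with
  | _ n IH =>
    intro c r hn hcr hout hall
    by_cases hce : c = r
    · subst hce
      rw [bwLoop, if_neg hout]
    · have hc : c ∈ S := hall c le_rfl (by omega)
      rw [bwLoop, if_pos hc]
      exact IH (r - (c + 1)).toNat (by omega) (c + 1) r rfl (by omega) hout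
        (fun x hx hx' => hall x (by omega) hx')

-- the run scan on a strictly increasing list: membership of [m, runScan], non-membership of +1
theorem runScan_spec : ∀ (rest : List Int) (m : Int), (m :: rest).Pairwise (· < ·) →
    m ≤ runScan m rest ∧
    (∀ x, m ≤ x → x ≤ runScan m rest → x ∈ m :: rest) ∧
    (runScan m rest + 1 ∉ m :: rest) := by
  intro rest
  induction rest with
  | nil =>
    intro m _
    refine ⟨le_rfl, ?_, ?_⟩
    · intro x h1 h2
      simp only [runScan] at h2
      have : x = m := by omega
      simp [this]
    · simp only [runScan, List.mem_singleton]
      omega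
  | cons v t ih =>
    intro m hpw
    have hmv : m < v := by
      have := List.pairwise_cons.1 hpw
      exact this.1 v (List.mem_cons_self ..)
    have hmt : ∀ y ∈ t, m < y := by
      have := List.pairwise_cons.1 hpw
      intro y hy
      exact this.1 y (List.mem_cons_of_mem _ hy)
    have hpw' : (v :: t).Pairwise (· < ·) := (List.pairwise_cons.1 hpw).2
    by_cases hv : v = m + 1
    · obtain ⟨ih1, ih2, ih3⟩ := ih v hpw'
      have hrs : runScan m (v :: t) = runScan v t := by
        simp [runScan, hv]
      rw [hrs]
      refine ⟨by omega, ?_, ?_⟩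
      · intro x h1 h2
        by_cases hx : x = m
        · simp [hx]
        · have : v ≤ x := by omega
          exact List.mem_cons_of_mem _ (ih2 x this h2)
      · intro hmem
        rcases List.mem_cons.1 hmem with h | h
        · omega
        · exact ih3 h
    · have hrs : runScan m (v :: t) = m := by
        simp [runScan, hv]
      rw [hrs]
      refine ⟨le_rfl, ?_, ?_⟩
      · intro x h1 h2
        have : x = m := by omega
        simp [this]
      · intro hmem
        rcases List.mem_cons.1 hmem with h | h
        · omega
        · rcases List.mem_cons.1 h with h' | h'
          · omega
          · have := hmt _ h'
            have hvt : v < m + 1 + 0 → False := by omega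
            have := (List.pairwise_cons.1 hpw').1 _ h'
            omega

-- B's cell update equals A's, pointwise on any current board
theorem cell_eq (rows cols row col : Nat) (b : List (List String)) :
    (if pvGetCell b row col = "-" then
        (pvDirs.foldl (pvAStep rows cols row col) ([], b)).2
      else b) =
    (if pvGetCell b row col ≠ "-" then b
      else
        match PySem.List.sorted (pvGatherB rows cols row col b) (fun x => x) false with
        | [] => b
        | m :: rest =>
          if 97 < m then pvSetCell b row col "a"
          else pvSetCell b row col
            (String.ofList [Char.ofNat (runScan m rest + 1).toNat])) := by
  by_cases hdash : pvGetCell b row col = "-"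
  · rw [if_pos hdash, if_neg (by simpa using hdash)]
    have hinv := aFold_inv rows cols row col b pvDirs (by decide) [] b (Or.inl rfl)
    rw [hinv]
    set L := pvDirs.foldl (gStep b rows cols row col) [] with hL
    set S := pvGatherB rows cols row col b with hS
    have hmem : ∀ x, x ∈ S ↔ x ∈ L := fun x => mem_gatherB_iff rows cols row col b hdash x
    have hnd : S.Nodup := by
      rw [hS, gatherB_eq]
      exact nodup_foldl_stepS _ _ (List.nodup_nil)
    rcases hvals : PySem.List.sorted S (fun x => x) false with _ | ⟨m, rest⟩
    · -- empty: no neighbor was appended either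
      have hSnil : S = [] := (PySem.List.sorted_eq_nil_iff S (fun x : Int => x) false).1 hvals
      have hLnil : L = [] := by
        rw [List.eq_nil_iff_forall_not_mem]
        intro x hx
        have := (hmem x).2 hx
        rw [hSnil] at this
        simp at this
      rw [if_pos hLnil]
    · -- nonempty
      have hmmemS : m ∈ S := by
        have : m ∈ PySem.List.sorted S (fun x => x) false := by rw [hvals]; simp
        rwa [PySem.List.mem_sorted] at this
      have hLne : L ≠ [] := by
        intro h
        have := (hmem m).1 hmmemS
        rw [h] at this
        simp at this
      have hLneq : L ≠ ([] : List Int) := hLne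
      rw [if_neg (by simpa using hLneq)]
      -- m is the minimum of S (hence of L)
      have hmin_le : ∀ y ∈ S, m ≤ y := by
        have := PySem.List.key_head_sorted_le (xs := S) (key := fun x : Int => x) hvals
        simpa using this
      have hminS : PySem.List.min? S (fun x => x) = some m := by
        obtain ⟨m', hm'⟩ := Option.ne_none_iff_exists'.1
          (fun h => (by
            have : S = [] := (PySem.List.min?_eq_none_iff S (fun x : Int => x)).1 h
            rw [this] at hmmemS; simp at hmmemS))
        have h1 : m' ∈ S := PySem.List.min?_mem hm'
        have h2 : ∀ y ∈ S, m' ≤ y := by have := PySem.List.min?_isMin hm'; simpa using this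
        have : m' = m := le_antisymm (h2 m hmmemS) (hmin_le m' h1)
        rw [hm', this]
      have hminL : PySem.List.min? L (fun x => x) = some m := by
        rw [← min_eq L S hmem, hminS]
      obtain ⟨M, hM⟩ := Option.ne_none_iff_exists'.1
        (fun h => hLne ((PySem.List.max?_eq_none_iff L (fun x : Int => x)).1 h))
      -- strictly increasing sorted list
      have hperm : (PySem.List.sorted S (fun x => x) false).Perm S :=
        PySem.List.sorted_perm S (fun x => x) false
      have hndv : (m :: rest).Pairwise (· < ·) := by
        have hle : (m :: rest).Pairwise (fun a b : Int => a ≤ b) := by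
          have := PySem.List.sorted_pairwise (xs := S) (key := fun x : Int => x)
          rwa [hvals] at this
        have hndv' : (m :: rest).Nodup := by
          have := hperm.nodup_iff.2 hnd
          rwa [hvals] at this
        have := hle.and hndv'
        exact this.imp (fun h => lt_of_le_of_ne h.1 h.2)
      have hmemv : ∀ x, x ∈ (m :: rest) ↔ x ∈ S := by
        intro x
        rw [← hvals, PySem.List.mem_sorted]
      obtain ⟨hrs1, hrs2, hrs3⟩ := runScan_spec rest m hndv
      have hloopL : awLoop L M (m + 1) = runScan m rest + 1 := by
        rw [loops_eq L L (fun x => Iff.rfl) M hM (m + 1)]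
        apply bwLoop_eq_of L (runScan m rest + 1 - (m + 1)).toNat (m + 1) _ rfl (by omega)
        · intro hc
          exact hrs3 ((hmemv _).2 ((hmem _).2 hc))
        · intro x hx hx'
          exact (hmem x).1 ((hmemv x).1 (hrs2 x (by omega) (by omega)))
      simp only [ansStr, hminL, Option.getD_some, hM]
      by_cases hm97 : (97 : Int) < m
      · rw [if_pos hm97, if_pos hm97]
      · rw [if_neg hm97, if_neg hm97, hloopL]
  · rw [if_neg hdash, if_pos (by simpa using hdash)]

theorem ports_eq (board : List (List String)) : fillLetters board = fillLetters_alt board := by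
  unfold fillLetters fillLetters_alt
  dsimp only
  congr 1
  funext b row
  congr 1
  funext b2 col
  exact cell_eq board.length (board.headD []).length row col b2

-- ===== VERDICT (by name: the statement is the Claim_ definition above) =====
theorem fillLetters_spec : Claim_equal_fillLetters := by
  intro board _ _
  unfold Spec_fillLetters
  exact ports_eq board
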